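-- pv_equiv track=rewrite | github.com/danrasband/coding-experiment-reviews | responses/2K4H9G-4WR/2_sum_of_certain_multiples.py | solution
-- ===== SOURCE A (Python) =====
-- def solution(x):
--     r = range(0,x)
--     sum = 0
--     for item in r:
--         dev3 = item % 3
--         dev5 = item % 5
--         if not dev3 or not dev5:
--             if not dev3 and not dev5:
--                 pass
--             else:
--                 sum += item
--     return sum
-- ===== SOURCE B (Python) =====
-- def solution(x):
--     if x <= 0:
--         return 0
--     def tri(k):
--         m = (x - 1) // k
--         return k * m * (m + 1) // 2
--     return tri(3) + tri(5) - 2 * tri(15)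
-- ===== Notes on version B (the rewrite author's own statement) =====
-- stated objective: faster
-- what changed: Replaces the linear loop over the range with closed-form arithmetic-series sums (multiples of three plus multiples of five minus twice multiples of fifteen), computed in constant time.
import Mathlib
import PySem

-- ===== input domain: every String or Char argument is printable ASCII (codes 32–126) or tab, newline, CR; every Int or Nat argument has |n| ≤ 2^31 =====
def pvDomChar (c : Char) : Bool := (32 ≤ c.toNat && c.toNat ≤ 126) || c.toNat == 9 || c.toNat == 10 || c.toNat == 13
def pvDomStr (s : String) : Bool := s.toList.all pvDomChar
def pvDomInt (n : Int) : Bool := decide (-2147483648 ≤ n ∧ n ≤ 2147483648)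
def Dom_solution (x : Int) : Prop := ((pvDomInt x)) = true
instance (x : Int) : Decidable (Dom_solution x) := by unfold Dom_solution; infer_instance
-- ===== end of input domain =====

-- B replaces A's O(x) loop by the closed-form series sum S3 + S5 - 2*S15 (faster: asymptotic, O(1) vs O(x)).

-- ===== PORT A =====
def solution (x : Int) : Int :=
  (PySem.List.pyRange 0 x 1).foldl (fun sum item =>
    let dev3 := PySem.Int.mod item 3
    let dev5 := PySem.Int.mod item 5
    if dev3 = 0 ∨ dev5 = 0 then
      if dev3 = 0 ∧ dev5 = 0 then sum
      else sum + item
    else sum) 0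

-- ===== PORT B =====
def pvTri (x k : Int) : Int :=
  let m := PySem.Int.floordiv (x - 1) k
  PySem.Int.floordiv (k * m * (m + 1)) 2

def solution_alt (x : Int) : Int :=
  if x ≤ 0 then 0
  else pvTri x 3 + pvTri x 5 - 2 * pvTri x 15

-- ===== PRECONDITION & SPEC =====
def Spec_solution (x : Int) (out : Int) : Prop := out = solution_alt x
instance (x : Int) (out : Int) : Decidable (Spec_solution x out) := by unfold Spec_solution; infer_instance

-- ===== CLAIM (what is proved, stated in full; the proofs are below) =====
def Claim_equal_solution : Prop := ∀ (x : Int), Dom_solution x → Spec_solution x (solution x)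

-- ===== LEMMAS AND PROOFS =====

-- Sum of multiples of k in [0, x) (proof-side reference value)
def pvS (k x : Int) : Int :=
  (PySem.List.pyRange 0 x 1).foldl (fun s i => s + if k ∣ i then i else 0) 0

lemma pvTri_zero (k : Int) (hk : 0 < k) : pvTri 0 k = 0 := by
  have hm : PySem.Int.floordiv (0 - 1) k = -1 := by
    rw [PySem.Int.floordiv_eq_iff_of_pos hk]; constructor <;> linarith
  show PySem.Int.floordiv
      (k * PySem.Int.floordiv (0 - 1) k * (PySem.Int.floordiv (0 - 1) k + 1)) 2 = 0
  rw [hm]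
  have h0 : k * (-1 : Int) * (-1 + 1) = 0 := by ring
  rw [h0, PySem.Int.floordiv_eq_iff_of_pos (by norm_num : (0:Int) < 2)]
  omega

lemma pvTri_succ (k : Int) (hk : 0 < k) (n : Nat) :
    pvTri ((n : Int) + 1) k = pvTri (n : Int) k + (if k ∣ (n : Int) then (n : Int) else 0) := by
  have hN : (0 : Int) ≤ (n : Int) := Int.natCast_nonneg n
  have hstep : (n : Int) + 1 - 1 = (n : Int) := by ring
  by_cases hd : k ∣ (n : Int)
  · obtain ⟨q, hq⟩ := hd
    have hm1 : PySem.Int.floordiv ((n : Int) + 1 - 1) k = q := by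
      rw [hstep, PySem.Int.floordiv_eq_iff_of_pos hk]; constructor <;> nlinarith
    have hm0 : PySem.Int.floordiv ((n : Int) - 1) k = q - 1 := by
      rw [PySem.Int.floordiv_eq_iff_of_pos hk]; constructor <;> nlinarith
    obtain ⟨t1, ht1⟩ := Int.even_mul_succ_self q
    obtain ⟨t0, ht0⟩ := Int.even_mul_succ_self (q - 1)
    have d1 : PySem.Int.floordiv (k * q * (q + 1)) 2 = k * t1 := by
      have e1 : k * q * (q + 1) = 2 * (k * t1) := by
        rw [mul_assoc, ht1]; ring
      rw [e1, PySem.Int.floordiv_eq_iff_of_pos (by norm_num : (0:Int) < 2)]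
      constructor <;> linarith
    have d0 : PySem.Int.floordiv (k * (q - 1) * (q - 1 + 1)) 2 = k * t0 := by
      have e0 : k * (q - 1) * (q - 1 + 1) = 2 * (k * t0) := by
        rw [mul_assoc, ht0]; ring
      rw [e0, PySem.Int.floordiv_eq_iff_of_pos (by norm_num : (0:Int) < 2)]
      constructor <;> linarith
    have htq : t1 = t0 + q := by nlinarith [ht1, ht0]
    show PySem.Int.floordiv
        (k * PySem.Int.floordiv ((n : Int) + 1 - 1) k *
          (PySem.Int.floordiv ((n : Int) + 1 - 1) k + 1)) 2
      = PySem.Int.floordiv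
          (k * PySem.Int.floordiv ((n : Int) - 1) k *
            (PySem.Int.floordiv ((n : Int) - 1) k + 1)) 2
        + (if k ∣ (n : Int) then (n : Int) else 0)
    rw [hm1, hm0, d1, d0, if_pos ⟨q, hq⟩, hq, htq]; ring
  · have h1 : PySem.Int.floordiv (n : Int) k * k + PySem.Int.mod (n : Int) k = (n : Int) :=
      PySem.Int.floordiv_mul_add_mod _ _
    have hre : PySem.Int.mod (n : Int) k = (n : Int) % k := PySem.Int.mod_eq_emod_of_pos hk
    have hr0 : 0 ≤ PySem.Int.mod (n : Int) k := by rw [hre]; exact Int.emod_nonneg _ (by omega)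
    have hrk : PySem.Int.mod (n : Int) k < k := by rw [hre]; exact Int.emod_lt_of_pos _ hk
    have hrne : PySem.Int.mod (n : Int) k ≠ 0 := by
      intro h; exact hd ((PySem.Int.mod_eq_zero_iff_dvd (n : Int) k).mp h)
    have hm1 : PySem.Int.floordiv ((n : Int) + 1 - 1) k = PySem.Int.floordiv (n : Int) k := by
      rw [hstep]
    have hr1 : 0 < PySem.Int.mod (n : Int) k := lt_of_le_of_ne hr0 (Ne.symm hrne)
    have hm0 : PySem.Int.floordiv ((n : Int) - 1) k = PySem.Int.floordiv (n : Int) k := by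
      rw [PySem.Int.floordiv_eq_iff_of_pos hk]; constructor <;> linarith
    show PySem.Int.floordiv
        (k * PySem.Int.floordiv ((n : Int) + 1 - 1) k *
          (PySem.Int.floordiv ((n : Int) + 1 - 1) k + 1)) 2
      = PySem.Int.floordiv
          (k * PySem.Int.floordiv ((n : Int) - 1) k *
            (PySem.Int.floordiv ((n : Int) - 1) k + 1)) 2
        + (if k ∣ (n : Int) then (n : Int) else 0)
    rw [hm1, hm0, if_neg hd]; ring

lemma pvS_succ (k : Int) (n : Nat) :
    pvS k ((n : Int) + 1) = pvS k (n : Int) + (if k ∣ (n : Int) then (n : Int) else 0) := by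
  unfold pvS
  rw [PySem.List.pyRange_one_succ_right (Int.natCast_nonneg n), List.foldl_append]
  simp

lemma pvS_eq_pvTri (k : Int) (hk : 0 < k) (n : Nat) : pvS k (n : Int) = pvTri (n : Int) k := by
  induction n with
  | zero => simp [pvS, PySem.List.pyRange_one_eq_nil (le_refl (0 : Int)), pvTri_zero k hk]
  | succ m ih =>
      have hc : ((m : Int) + 1) = ((m + 1 : Nat) : Int) := by push_cast; ring
      rw [← hc, pvS_succ, pvTri_succ k hk, ih]

lemma solution_decompose (n : Nat) :
    solution (n : Int) = pvS 3 (n : Int) + pvS 5 (n : Int) - 2 * pvS 15 (n : Int) := by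
  induction n with
  | zero => simp [solution, pvS, PySem.List.pyRange_one_eq_nil (le_refl (0 : Int))]
  | succ m ih =>
      have hc : ((m : Int) + 1) = ((m + 1 : Nat) : Int) := by push_cast; ring
      have h3 : PySem.Int.mod (m : Int) 3 = 0 ↔ (3 : Int) ∣ (m : Int) :=
        PySem.Int.mod_eq_zero_iff_dvd _ _
      have h5 : PySem.Int.mod (m : Int) 5 = 0 ↔ (5 : Int) ∣ (m : Int) :=
        PySem.Int.mod_eq_zero_iff_dvd _ _
      have h15 : (15 : Int) ∣ (m : Int) ↔ (3 : Int) ∣ (m : Int) ∧ (5 : Int) ∣ (m : Int) := by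
        constructor
        · intro h; exact ⟨dvd_trans (by norm_num) h, dvd_trans (by norm_num) h⟩
        · rintro ⟨⟨a, ha⟩, ⟨b, hb⟩⟩; omega
      have hsA : solution ((m : Int) + 1)
          = solution (m : Int) +
            (if PySem.Int.mod (m : Int) 3 = 0 ∨ PySem.Int.mod (m : Int) 5 = 0 then
               if PySem.Int.mod (m : Int) 3 = 0 ∧ PySem.Int.mod (m : Int) 5 = 0 then 0
               else (m : Int)
             else 0) := by
        unfold solution
        rw [PySem.List.pyRange_one_succ_right (Int.natCast_nonneg m), List.foldl_append]
        simp only [List.foldl_cons, List.foldl_nil]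
        split_ifs <;> ring
      rw [← hc, hsA, ih, pvS_succ, pvS_succ, pvS_succ]
      by_cases c3 : (3 : Int) ∣ (m : Int) <;> by_cases c5 : (5 : Int) ∣ (m : Int) <;>
        simp [h15, c3, c5] <;> ring

-- ===== VERDICT (by name: the statement is the Claim_ definition above) =====
theorem solution_spec : Claim_equal_solution := by
  intro x _
  unfold Spec_solution solution_alt
  by_cases hx : x ≤ 0
  · simp [hx, solution, PySem.List.pyRange_one_eq_nil hx]
  · have hxe : x = ((x.toNat : Nat) : Int) := by omega
    rw [hxe, solution_decompose, if_neg (by omega),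
        pvS_eq_pvTri 3 (by norm_num), pvS_eq_pvTri 5 (by norm_num),
        pvS_eq_pvTri 15 (by norm_num)]
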